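-- pv_equiv track=rewrite | github.com/russfeld/adventofcode | 2022/Day17.py | extend_cave
-- ===== SOURCE A (Python) =====
-- def is_empty_row(line):
--   for item in line:
--     if item == 1:
--       return False
--   return True
--
-- def extend_cave(cave, rock):
--   count_open = 0
--   start = len(cave)
--   for line in reversed(cave):
--     if is_empty_row(line):
--       count_open += 1
--       start -= 1
--     else:
--       break
--   while count_open < (3 + len(rock)):
--     cave.append([0, 0, 0, 0, 0, 0, 0])
--     count_open += 1
--   return cave, start + 3
-- ===== SOURCE B (Python) =====
-- def extend_cave(cave, rock):
--   highest = -1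
--   for i, row in enumerate(cave):
--     if 1 in row:
--       highest = i
--   start = highest + 1
--   empty = len(cave) - start
--   cave += [[0, 0, 0, 0, 0, 0, 0] for _ in range(3 + len(rock) - empty)]
--   return cave, start + 3
-- ===== Notes on version B (the rewrite author's own statement) =====
-- stated objective: simpler
-- what changed: Replaces A's backward count-and-break scan plus a while-append loop by a single forward scan that records the highest occupied row index and one closed-form list extension of the computed number of padding rows.
import Mathlib
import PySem

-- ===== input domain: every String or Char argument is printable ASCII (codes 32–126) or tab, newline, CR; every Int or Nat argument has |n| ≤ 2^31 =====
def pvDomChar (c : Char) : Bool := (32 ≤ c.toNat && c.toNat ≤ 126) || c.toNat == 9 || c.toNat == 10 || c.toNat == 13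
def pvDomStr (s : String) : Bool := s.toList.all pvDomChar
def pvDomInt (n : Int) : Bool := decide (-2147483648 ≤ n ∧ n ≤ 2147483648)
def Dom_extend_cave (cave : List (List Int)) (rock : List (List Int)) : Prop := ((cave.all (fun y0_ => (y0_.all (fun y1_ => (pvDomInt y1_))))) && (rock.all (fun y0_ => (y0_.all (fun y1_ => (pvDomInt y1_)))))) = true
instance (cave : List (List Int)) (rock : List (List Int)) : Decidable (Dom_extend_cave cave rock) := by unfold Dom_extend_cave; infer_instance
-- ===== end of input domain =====

-- B replaces A's backward count-and-break scan plus while-append loop by a forward scan for the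
-- highest occupied row and one closed-form padding extension; same return value, same in-place growth.


-- ===== PORT A =====
-- is_empty_row: scans the line, returns False at the first 1
def is_empty_row : List Int → Bool
  | [] => true
  | item :: rest => if item == 1 then false else is_empty_row rest

-- the 'for line in reversed(cave): … else: break' loop, carrying (count_open, start)
def extendScanA : List (List Int) → Int → Int → Int × Int
  | [], count_open, start => (count_open, start)
  | line :: rest, count_open, start =>
      if is_empty_row line then extendScanA rest (count_open + 1) (start - 1)
      else (count_open, start)

-- the 'while count_open < (3 + len(rock)): cave.append(...)' loop
def extendPadA (cave : List (List Int)) (count_open target : Int) : List (List Int) :=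
  if count_open < target then
    extendPadA (cave ++ [[0, 0, 0, 0, 0, 0, 0]]) (count_open + 1) target
  else cave
termination_by (target - count_open).toNat
decreasing_by omega

def extend_cave (cave : List (List Int)) (rock : List (List Int)) : List (List Int) × Int :=
  let cs := extendScanA cave.reverse 0 (cave.length : Int)
  let cave2 := extendPadA cave cs.1 (3 + (rock.length : Int))
  (cave2, cs.2 + 3)

-- ===== PORT B =====
def extend_cave_alt (cave : List (List Int)) (rock : List (List Int)) : List (List Int) × Int :=
  let highest : Int :=
    (PySem.List.enumerate cave).foldl (fun acc p => if (1 : Int) ∈ p.2 then p.1 else acc) (-1)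
  let start := highest + 1
  let empty := (cave.length : Int) - start
  let cave2 := cave ++ List.replicate (3 + (rock.length : Int) - empty).toNat [0, 0, 0, 0, 0, 0, 0]
  (cave2, start + 3)

-- ===== PRECONDITION & SPEC =====
def Spec_extend_cave (cave : List (List Int)) (rock : List (List Int)) (out : List (List Int) × Int) : Prop := out = extend_cave_alt cave rock
instance (cave : List (List Int)) (rock : List (List Int)) (out : List (List Int) × Int) : Decidable (Spec_extend_cave cave rock out) := by unfold Spec_extend_cave; infer_instance

-- ===== CLAIM (what is proved, stated in full; the proofs are below) =====
def Claim_equal_extend_cave : Prop := ∀ (cave : List (List Int)) (rock : List (List Int)), Dom_extend_cave cave rock → Spec_extend_cave cave rock (extend_cave cave rock)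

-- ===== LEMMAS AND PROOFS =====

-- is_empty_row is "no 1 in the row"
theorem is_empty_row_eq (l : List Int) : is_empty_row l = !decide ((1 : Int) ∈ l) := by
  induction l with
  | nil => rfl
  | cons x xs ih =>
      simp only [is_empty_row, List.mem_cons]
      by_cases h : x = 1
      · subst h; simp
      · have h1 : (x == 1) = false := by simpa using h
        have h2 : ¬ (1 : Int) = x := fun e => h e.symm
        simp [h1, h2, ih]

-- the backward scan returns (c + k, s - k) where k counts the leading empty rows
theorem extendScanA_eq (l : List (List Int)) (c s : Int) :
    extendScanA l c s =
      (c + (l.takeWhile (fun r => !decide ((1 : Int) ∈ r))).length,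
       s - (l.takeWhile (fun r => !decide ((1 : Int) ∈ r))).length) := by
  induction l generalizing c s with
  | nil => simp [extendScanA]
  | cons x xs ih =>
      simp only [extendScanA, is_empty_row_eq, List.takeWhile_cons]
      by_cases h : (1 : Int) ∈ x
      · simp [h]
      · simp only [h, decide_false, Bool.not_false, if_true, ih, Prod.ext_iff]
        refine ⟨?_, ?_⟩ <;> simp <;> ring

-- the padding loop appends exactly (target - c).toNat fresh rows
theorem extendPadA_eq (cave : List (List Int)) (c target : Int) :
    extendPadA cave c target = cave ++ List.replicate (target - c).toNat [0, 0, 0, 0, 0, 0, 0] := by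
  by_cases h : c < target
  · have : (target - (c + 1)).toNat < (target - c).toNat := by omega
    rw [extendPadA, if_pos h, extendPadA_eq (cave ++ [[0, 0, 0, 0, 0, 0, 0]]) (c + 1) target]
    have hk : (target - c).toNat = (target - (c + 1)).toNat + 1 := by omega
    simp [hk, List.replicate_succ, List.append_assoc]
  · rw [extendPadA, if_neg h]
    have : (target - c).toNat = 0 := by omega
    simp [this]
termination_by (target - c).toNat

-- the forward fold finds len - 1 - k, where k counts trailing empty rows of cave
theorem foldB_eq (cave : List (List Int)) :
    (PySem.List.enumerate cave).foldl (fun acc p => if (1 : Int) ∈ p.2 then p.1 else acc) (-1)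
      = (cave.length : Int) - 1 - (cave.reverse.takeWhile (fun r => !decide ((1 : Int) ∈ r))).length := by
  induction cave using List.reverseRecOn with
  | nil => simp
  | append_singleton xs x ih =>
      rw [PySem.List.enumerate_append]
      simp only [List.foldl_append, PySem.List.enumerate_cons, PySem.List.enumerate_nil,
        List.foldl_cons, List.foldl_nil, List.reverse_append, List.reverse_singleton,
        List.singleton_append, List.takeWhile_cons]
      by_cases h : (1 : Int) ∈ x
      · simp [h]
      · simp only [h, decide_false, Bool.not_false, if_true, if_false, ih, List.length_cons,
          List.length_append, List.length_nil]
        push_cast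
        ring

-- ===== VERDICT (by name: the statement is the Claim_ definition above) =====
theorem extend_cave_spec : Claim_equal_extend_cave := by
  intro cave rock _
  unfold Spec_extend_cave
  have hk : (cave.reverse.takeWhile (fun r => !decide ((1 : Int) ∈ r))).length ≤ cave.length := by
    have := (List.takeWhile_sublist (l := cave.reverse)
      (p := fun r => !decide ((1 : Int) ∈ r))).length_le
    simpa using this
  simp only [extend_cave, extend_cave_alt, extendScanA_eq, extendPadA_eq, foldB_eq, Prod.mk.injEq]
  constructor
  · congr 2
    omega
  · omega
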